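-- pv_equiv track=rewrite | github.com/versalhes-cohort/transcricao | app/chunking.py | stitch_transcripts
-- ===== SOURCE A (Python) =====
-- def stitch_transcripts(chunks: list[str], max_overlap_words: int = 25) -> str:
--     """Concatenate chunk transcripts with simple boundary de-duplication.
--
--     Strategy (architecture §5.3):
--     - For each adjacent pair, find the longest suffix-of-tail / prefix-of-head
--       n-gram match (case-insensitive, normalized punctuation).
--     - If overlap >= 3 words → elide; else concat with a single space (AC5
--       acceptable duplication when no clean boundary).
--     """
--     if not chunks:
--         return ""
--     if len(chunks) == 1:
--         return chunks[0]
--     result = chunks[0]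
--     for next_chunk in chunks[1:]:
--         result = _merge_at_boundary(result, next_chunk, max_overlap_words)
--     return result
--
-- def _merge_at_boundary(left: str, right: str, max_overlap_words: int) -> str:
--     """Find the longest matching word-sequence at the seam and elide.
--
--     Returns the merged string. If no overlap of >=3 words is found,
--     returns ``left + ' ' + right`` (per AC5: minor duplication acceptable).
--     """
--     tail_words = left.split()[-max_overlap_words:]
--     head_words = right.split()[:max_overlap_words]
--
--     def _norm(word: str) -> str:
--         return word.strip(".,;:!?\"'").lower()
--
--     tail_norm = [_norm(w) for w in tail_words]
--     head_norm = [_norm(w) for w in head_words]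
--
--     # Find longest k where tail_norm[-k:] == head_norm[:k].
--     best_k = 0
--     for k in range(min(len(tail_norm), len(head_norm)), 0, -1):
--         if tail_norm[-k:] == head_norm[:k]:
--             best_k = k
--             break
--
--     if best_k >= 3:
--         # Elide overlap: keep `left`, append `right` from after the overlap.
--         remainder = " ".join(right.split()[best_k:])
--         return f"{left} {remainder}".strip() if remainder else left
--
--     # Fallback: simple concat with a single space (AC5 allows minor duplication).
--     if not left:
--         return right
--     if not right:
--         return left
--     return f"{left} {right}"
-- ===== SOURCE B (Python) =====
-- _PUNCT = ".,;:!?\"'"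
--
--
-- def _norm(w):
--     return w.strip(_PUNCT).lower()
--
--
-- def _overlap(tail, head):
--     """Longest k with tail[-k:] == head[:k], computed as the KMP prefix
--     function of head + [" "] + tail (the single-space sentinel can never
--     equal a token: tokens come from str.split() and contain no whitespace)."""
--     s = head + [" "] + tail
--     pi = [0] * len(s)
--     k = 0
--     for i in range(1, len(s)):
--         while k and s[i] != s[k]:
--             k = pi[k - 1]
--         if s[i] == s[k]:
--             k += 1
--         pi[i] = k
--     return k
--
--
-- def stitch_transcripts(chunks: list[str], max_overlap_words: int = 25) -> str:
--     """Stitch chunks; the seam overlap is found by KMP failure links instead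
--     of comparing every candidate slice pair, and a running list of the
--     result's normalized words avoids re-splitting the accumulated result."""
--     if not chunks:
--         return ""
--     result = chunks[0]
--     words = [_norm(w) for w in result.split()]
--     for nxt in chunks[1:]:
--         nxt_words = nxt.split()
--         tail = words[-max_overlap_words:]
--         head = [_norm(w) for w in nxt_words[:max_overlap_words]]
--         best = _overlap(tail, head)
--         if best >= 3:
--             rem = nxt_words[best:]
--             if rem:
--                 result += " " + " ".join(rem)
--                 result = result.strip()
--             words += [_norm(w) for w in rem]
--         elif not result:
--             result = nxt
--             words += [_norm(w) for w in nxt_words]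
--         elif nxt:
--             result += " " + nxt
--             words += [_norm(w) for w in nxt_words]
--     return result
-- ===== Notes on version B (the rewrite author's own statement) =====
-- stated objective: faster
-- what changed: B finds each seam overlap with the KMP prefix-function of head + sentinel + tail (failure links) instead of A's quadratic try-every-k slice comparison, and keeps a running list of the result's normalized words so the accumulated transcript is never re-split per chunk.
import Mathlib
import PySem

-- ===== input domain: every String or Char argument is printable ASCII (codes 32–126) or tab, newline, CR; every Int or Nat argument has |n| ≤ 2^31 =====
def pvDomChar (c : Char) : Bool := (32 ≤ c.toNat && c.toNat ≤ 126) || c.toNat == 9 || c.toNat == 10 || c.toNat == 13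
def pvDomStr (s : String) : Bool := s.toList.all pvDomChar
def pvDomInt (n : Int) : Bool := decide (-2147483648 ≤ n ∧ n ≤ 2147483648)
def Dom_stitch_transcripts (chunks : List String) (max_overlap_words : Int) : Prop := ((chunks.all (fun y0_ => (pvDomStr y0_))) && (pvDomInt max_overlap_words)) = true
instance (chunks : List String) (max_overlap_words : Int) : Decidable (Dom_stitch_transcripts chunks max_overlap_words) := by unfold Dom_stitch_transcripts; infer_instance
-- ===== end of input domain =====

-- B finds each seam overlap with the KMP prefix function (failure links) instead of A's
-- try-every-k slice comparison, and keeps a running list of the result's normalized words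
-- so the accumulated transcript is never re-split; measurably faster.

-- ===== PORT A =====
-- _norm (nested helper of _merge_at_boundary): w.strip(".,;:!?\"'").lower()
def pvNormA (w : List Char) : List Char :=
  PySem.Chars.lower (PySem.Chars.stripChars w ['.', ',', ';', ':', '!', '?', '"', '\''])

-- the `for k in range(min,0,-1): if …: best_k = k; break` loop (best_k stays 0 if no k matches)
def pvSearchA (tailN headN : List (List Char)) : List Int → Int
  | [] => 0
  | k :: rest =>
    if PySem.List.slice tailN (some (-k)) none = PySem.List.slice headN none (some k)
    then k else pvSearchA tailN headN rest

-- _merge_at_boundary(left, right, max_overlap_words)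
def pvMergeA (left right : List Char) (m : Int) : List Char :=
  let tail_words := PySem.List.slice (PySem.Chars.split₀ left) (some (-m)) none
  let head_words := PySem.List.slice (PySem.Chars.split₀ right) none (some m)
  let tail_norm := tail_words.map pvNormA
  let head_norm := head_words.map pvNormA
  let best_k := pvSearchA tail_norm head_norm
    (PySem.List.pyRange (min (tail_norm.length : Int) (head_norm.length : Int)) 0 (-1))
  if 3 ≤ best_k then
    let remainder := PySem.Chars.join [' '] (PySem.List.slice (PySem.Chars.split₀ right) (some best_k) none)
    if remainder ≠ [] then PySem.Chars.strip (left ++ ' ' :: remainder) else left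
  else if left = [] then right
  else if right = [] then left
  else left ++ ' ' :: right

def stitch_transcripts (chunks : List String) (max_overlap_words : Int) : String :=
  match chunks with
  | [] => ""
  | [c] => c
  | c :: rest =>
    String.ofList (rest.foldl (fun acc nx => pvMergeA acc nx.toList max_overlap_words) c.toList)

-- ===== PORT B =====
-- _norm (module-level helper of Source B)
def pvNormB (w : List Char) : List Char :=
  PySem.Chars.lower (PySem.Chars.stripChars w ['.', ',', ';', ':', '!', '?', '"', '\''])

-- Source B's `while k and s[i] != s[k]: k = pi[k-1]` fallback loop, followed by the stop test;
-- `min … (k-1)` only provides the termination measure (pi[k-1] < k always holds on reachable states)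
def pvFallB (s : List (List Char)) (pi : List Nat) (c : List Char) (k : Nat) : Nat :=
  if k = 0 then 0
  else if s.getD k [] = c then k
  else pvFallB s pi c (min (pi.getD (k - 1) 0) (k - 1))
termination_by k
decreasing_by
  have := Nat.min_le_right (pi.getD (k - 1) 0) (k - 1)
  omega

-- one iteration `i` of Source B's `for i in range(1, len(s))` (state = (k, pi))
def pvStepK (s : List (List Char)) (st : Nat × List Nat) (i : Nat) : Nat × List Nat :=
  let c := s.getD i []
  let k1 := pvFallB s st.2 c st.1
  let k2 := if s.getD k1 [] = c then k1 + 1 else k1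
  (k2, st.2 ++ [k2])

-- _overlap(tail, head): KMP prefix function of head + [" "] + tail; returns final k
def pvOverlapB (tailN headN : List (List Char)) : Nat :=
  let s := headN ++ [[' ']] ++ tailN
  ((List.range' 1 (s.length - 1)).foldl (pvStepK s) (0, [0])).1

-- one iteration of Source B's chunk loop; state = (result, normalized words of result)
def pvStepB (st : List Char × List (List Char)) (nxt : List Char) (m : Int) :
    List Char × List (List Char) :=
  let result := st.1
  let words := st.2
  let nxt_words := PySem.Chars.split₀ nxt
  let tail := PySem.List.slice words (some (-m)) none
  let head := (PySem.List.slice nxt_words none (some m)).map pvNormB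
  let best := pvOverlapB tail head
  if 3 ≤ best then
    let rem_words := PySem.List.slice nxt_words (some (best : Int)) none
    (if rem_words ≠ [] then PySem.Chars.strip (result ++ ' ' :: PySem.Chars.join [' '] rem_words) else result,
     words ++ rem_words.map pvNormB)
  else if result = [] then (nxt, words ++ nxt_words.map pvNormB)
  else if nxt = [] then (result, words)
  else (result ++ ' ' :: nxt, words ++ nxt_words.map pvNormB)

def stitch_transcripts_alt (chunks : List String) (max_overlap_words : Int) : String :=
  match chunks with
  | [] => ""
  | c :: rest =>
    String.ofList ((rest.foldl (fun st nx => pvStepB st nx.toList max_overlap_words)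
      (c.toList, (PySem.Chars.split₀ c.toList).map pvNormB)).1)

-- ===== PRECONDITION & SPEC =====
def Spec_stitch_transcripts (chunks : List String) (max_overlap_words : Int) (out : String) : Prop := out = stitch_transcripts_alt chunks max_overlap_words
instance (chunks : List String) (max_overlap_words : Int) (out : String) : Decidable (Spec_stitch_transcripts chunks max_overlap_words out) := by unfold Spec_stitch_transcripts; infer_instance

-- ===== CLAIM (what is proved, stated in full; the proofs are below) =====
def Claim_equal_stitch_transcripts : Prop := ∀ (chunks : List String) (max_overlap_words : Int), Dom_stitch_transcripts chunks max_overlap_words → Spec_stitch_transcripts chunks max_overlap_words (stitch_transcripts chunks max_overlap_words)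

-- ===== LEMMAS AND PROOFS =====

-- the split₀ worker: accumulator comes out in front
theorem pv_go_acc (s : List Char) : ∀ cur acc,
    PySem.Chars.split₀.go s cur acc = acc.reverse ++ PySem.Chars.split₀.go s cur [] := by
  induction s with
  | nil =>
    intro cur acc
    simp [PySem.Chars.split₀.go]
    split <;> simp
  | cons c rest ih =>
    intro cur acc
    simp only [PySem.Chars.split₀.go]
    split
    · split
      · rw [ih [] acc]
      · rw [ih [] (cur.reverse :: acc), ih [] [cur.reverse]]
        simp
    · exact ih (c :: cur) acc

theorem pv_go_append_space (c : Char) (hc : PySem.Chars.isspace c = true) (r : List Char)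
    (l : List Char) : ∀ cur acc,
    PySem.Chars.split₀.go (l ++ c :: r) cur acc
      = PySem.Chars.split₀.go l cur acc ++ PySem.Chars.split₀.go r [] [] := by
  induction l with
  | nil =>
    intro cur acc
    simp only [List.nil_append, PySem.Chars.split₀.go, hc, if_true]
    split
    · exact pv_go_acc r [] acc
    · exact pv_go_acc r [] (cur.reverse :: acc)
  | cons c' l' ih =>
    intro cur acc
    simp only [List.cons_append, PySem.Chars.split₀.go]
    split
    · split <;> rw [ih]
    · rw [ih]

-- splitting across a whitespace character splits the two sides independently
theorem pv_split_append_space (c : Char) (hc : PySem.Chars.isspace c = true) (l r : List Char) :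
    PySem.Chars.split₀ (l ++ c :: r) = PySem.Chars.split₀ l ++ PySem.Chars.split₀ r := by
  unfold PySem.Chars.split₀
  exact pv_go_append_space c hc r l [] []

theorem pv_split_spaces (t : List Char) (ht : ∀ ch ∈ t, PySem.Chars.isspace ch = true) :
    PySem.Chars.split₀ t = [] := by
  induction t with
  | nil => rfl
  | cons c t' ih =>
    have := pv_split_append_space c (ht c (by simp)) [] t'
    simp only [List.nil_append] at this
    rw [this, ih (fun ch h => ht ch (by simp [h]))]
    rfl

theorem pv_split_append_spaces (s t : List Char)
    (ht : ∀ ch ∈ t, PySem.Chars.isspace ch = true) :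
    PySem.Chars.split₀ (s ++ t) = PySem.Chars.split₀ s := by
  cases t with
  | nil => simp
  | cons c t' =>
    rw [pv_split_append_space c (ht c (by simp)) s t',
        pv_split_spaces t' (fun ch h => ht ch (by simp [h]))]
    simp

theorem pv_split_prepend_spaces (s t : List Char)
    (ht : ∀ ch ∈ t, PySem.Chars.isspace ch = true) :
    PySem.Chars.split₀ (t ++ s) = PySem.Chars.split₀ s := by
  induction t with
  | nil => simp
  | cons c t' ih =>
    have := pv_split_append_space c (ht c (by simp)) [] (t' ++ s)
    simp only [List.nil_append] at this
    rw [List.cons_append, this, ih (fun ch h => ht ch (by simp [h]))]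
    rfl

-- stripping does not change the word list
theorem pv_split_strip (s : List Char) :
    PySem.Chars.split₀ (PySem.Chars.strip s) = PySem.Chars.split₀ s := by
  unfold PySem.Chars.strip PySem.Chars.rstrip PySem.Chars.lstrip
  have hl : PySem.Chars.split₀ (List.dropWhile PySem.Chars.isspace s) = PySem.Chars.split₀ s := by
    conv_rhs => rw [← List.takeWhile_append_dropWhile (p := PySem.Chars.isspace) (l := s)]
    exact (pv_split_prepend_spaces _ _ (fun ch h => List.mem_takeWhile_imp h)).symm
  set x := List.dropWhile PySem.Chars.isspace s with hx
  rw [← hl]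
  have hdecomp : x = (List.dropWhile PySem.Chars.isspace x.reverse).reverse
      ++ (List.takeWhile PySem.Chars.isspace x.reverse).reverse := by
    conv_lhs => rw [← List.reverse_reverse x,
      ← List.takeWhile_append_dropWhile (p := PySem.Chars.isspace) (l := x.reverse)]
    rw [List.reverse_append]
  conv_rhs => rw [hdecomp]
  exact (pv_split_append_spaces _ _
    (fun ch h => List.mem_takeWhile_imp (List.mem_reverse.mp h))).symm

-- every word produced by split₀ is nonempty and contains no whitespace
theorem pv_split_words_go (s : List Char) : ∀ cur acc,
    (∀ ch ∈ cur, PySem.Chars.isspace ch = false) →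
    (∀ w ∈ acc, w ≠ [] ∧ ∀ ch ∈ w, PySem.Chars.isspace ch = false) →
    ∀ w ∈ PySem.Chars.split₀.go s cur acc, w ≠ [] ∧ ∀ ch ∈ w, PySem.Chars.isspace ch = false := by
  induction s with
  | nil =>
    intro cur acc hcur hacc w hw
    simp only [PySem.Chars.split₀.go] at hw
    split at hw
    · simp at hw; exact hacc w hw
    · simp at hw
      rcases hw with hw | hw
      · exact hacc w hw
      · subst hw
        constructor
        · simp only [ne_eq, List.reverse_eq_nil_iff]
          intro h; subst h; simp_all
        · intro ch hch; exact hcur ch (List.mem_reverse.mp hch)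
  | cons c rest ih =>
    intro cur acc hcur hacc w hw
    simp only [PySem.Chars.split₀.go] at hw
    by_cases hc : PySem.Chars.isspace c = true
    · rw [if_pos hc] at hw
      split at hw
      · exact ih [] acc (by simp) hacc w hw
      · refine ih [] (cur.reverse :: acc) (by simp) ?_ w hw
        intro v hv
        rcases List.mem_cons.mp hv with hv | hv
        · subst hv
          constructor
          · simp only [ne_eq, List.reverse_eq_nil_iff]
            intro h; subst h; simp_all
          · intro ch hch; exact hcur ch (List.mem_reverse.mp hch)
        · exact hacc v hv
    · rw [if_neg hc] at hw
      refine ih (c :: cur) acc ?_ hacc w hw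
      intro ch hch
      rcases List.mem_cons.mp hch with h | h
      · subst h; simpa using hc
      · exact hcur ch h

theorem pv_split_words (s : List Char) :
    ∀ w ∈ PySem.Chars.split₀ s, w ≠ [] ∧ ∀ ch ∈ w, PySem.Chars.isspace ch = false :=
  pv_split_words_go s [] [] (by simp) (by simp)

-- a single word splits to itself
theorem pv_go_word (s : List Char) : ∀ cur acc,
    (∀ ch ∈ s, PySem.Chars.isspace ch = false) →
    PySem.Chars.split₀.go s cur acc
      = if cur = [] ∧ s = [] then acc.reverse else acc.reverse ++ [cur.reverse ++ s] := by
  induction s with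
  | nil =>
    intro cur acc _
    simp only [PySem.Chars.split₀.go]
    rcases eq_or_ne cur [] with h | h
    · simp [h]
    · simp [h, List.isEmpty_iff]
  | cons c s' ih =>
    intro cur acc hs
    simp only [PySem.Chars.split₀.go, hs c (by simp), Bool.false_eq_true, if_false]
    rw [ih (c :: cur) acc (fun ch h => hs ch (by simp [h]))]
    simp

theorem pv_split_word (w : List Char) (hne : w ≠ [])
    (hns : ∀ ch ∈ w, PySem.Chars.isspace ch = false) :
    PySem.Chars.split₀ w = [w] := by
  unfold PySem.Chars.split₀
  rw [pv_go_word w [] [] hns]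
  simp [hne]

-- joining genuine words with a single space and re-splitting gives the words back
theorem pv_split_join (ws : List (List Char))
    (h : ∀ w ∈ ws, w ≠ [] ∧ ∀ ch ∈ w, PySem.Chars.isspace ch = false) :
    PySem.Chars.split₀ (PySem.Chars.join [' '] ws) = ws := by
  induction ws with
  | nil => rfl
  | cons w ws' ih =>
    cases ws' with
    | nil =>
      have hw := h w (by simp)
      rw [PySem.Chars.join_singleton]
      exact pv_split_word w hw.1 hw.2
    | cons v vs =>
      have hw := h w (by simp)
      have hjoin : PySem.Chars.join [' '] (w :: v :: vs)
          = w ++ ' ' :: PySem.Chars.join [' '] (v :: vs) := by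
        rw [PySem.Chars.join_cons_cons]; simp
      rw [hjoin, pv_split_append_space ' ' (by decide) w _,
          pv_split_word w hw.1 hw.2, ih (fun v hv => h v (by simp [hv]))]
      rfl

-- a join of nonempty words is empty exactly when there are no words
theorem pv_join_ne_nil (ws : List (List Char)) (hne : ws ≠ [])
    (h : ∀ w ∈ ws, w ≠ []) : PySem.Chars.join [' '] ws ≠ [] := by
  cases ws with
  | nil => simp at hne
  | cons w ws' =>
    cases ws' with
    | nil =>
      rw [PySem.Chars.join_singleton]
      exact h w (by simp)
    | cons v vs =>
      rw [PySem.Chars.join_cons_cons]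
      intro hcontra
      simp only [List.append_assoc, List.append_eq_nil_iff] at hcontra
      exact h w (by simp) hcontra.1

-- members of a slice are members of the list
theorem pv_mem_slice {α : Type} {xs : List α} {a? b? : Option Int} {w : α}
    (h : w ∈ PySem.List.slice xs a? b?) : w ∈ xs := by
  simp only [PySem.List.slice] at h
  exact List.mem_of_mem_drop (List.mem_of_mem_take h)

-- slicing commutes with map
theorem pv_slice_map {α β : Type} (f : α → β) (xs : List α) (a? b? : Option Int) :
    PySem.List.slice (xs.map f) a? b? = (PySem.List.slice xs a? b?).map f := by
  simp only [PySem.List.slice, List.length_map, List.map_drop, List.map_take]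

-- for 0 ≤ k ≤ len, xs[-k:] = xs[len-k:]
theorem pv_slice_neg {α : Type} (xs : List α) (k : Int) (h0 : 1 ≤ k)
    (hk : k ≤ (xs.length : Int)) :
    PySem.List.slice xs (some (-k)) none = PySem.List.slice xs (some ((xs.length : Int) - k)) none := by
  have h1 : PySem.List.clampIdx xs.length (-k) = xs.length - k.toNat := by
    simp only [PySem.List.clampIdx]
    split_ifs <;> omega
  have h2 : PySem.List.clampIdx xs.length ((xs.length : Int) - k) = xs.length - k.toNat := by
    simp only [PySem.List.clampIdx]
    split_ifs <;> omega
  simp only [PySem.List.slice, h1, h2]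

theorem pyRange_down_cons (n : Nat) (h : 1 ≤ n) :
    PySem.List.pyRange (n : Int) 0 (-1) = (n : Int) :: PySem.List.pyRange ((n : Int) - 1) 0 (-1) := by
  obtain ⟨m, rfl⟩ : ∃ m, n = m + 1 := ⟨n - 1, by omega⟩
  simp only [PySem.List.pyRange]
  norm_num
  rw [List.range_succ_eq_map]
  simp only [List.map_cons, List.map_map]
  rcases Nat.eq_zero_or_pos m with hm | hm
  · subst hm; norm_num
  · rw [if_pos hm]
    refine List.cons_eq_cons.mpr ⟨by push_cast; ring, ?_⟩
    apply List.map_congr_left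
    intro k _
    simp only [Function.comp_apply]
    push_cast; ring

-- ---- characterisation of A's descending seam search ----

-- "k is a valid seam overlap": k ≤ both lengths and the normalized slices agree
def pvGood (tailN headN : List (List Char)) (k : Nat) : Prop :=
  k ≤ min tailN.length headN.length ∧ tailN.drop (tailN.length - k) = headN.take k

-- A's slice condition, for 1 ≤ k ≤ min, is exactly pvGood
theorem pv_slice_cond_iff (tailN headN : List (List Char)) (k : Nat) (h1 : 1 ≤ k)
    (hk : k ≤ min tailN.length headN.length) :
    (PySem.List.slice tailN (some (-(k : Int))) none
      = PySem.List.slice headN none (some (k : Int)))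
      ↔ tailN.drop (tailN.length - k) = headN.take k := by
  rw [pv_slice_neg tailN (k : Int) (by exact_mod_cast h1) (by
        have := Nat.min_le_left tailN.length headN.length; exact_mod_cast le_trans hk this)]
  have hcast : (tailN.length : Int) - (k : Int) = ((tailN.length - k : Nat) : Int) := by
    have := Nat.min_le_left tailN.length headN.length
    omega
  rw [hcast, PySem.List.slice_from_natCast, PySem.List.slice_to_natCast]

theorem pv_searchA_spec (tailN headN : List (List Char)) (n : Nat)
    (hn : n ≤ min tailN.length headN.length) :
    ∃ k : Nat, pvSearchA tailN headN (PySem.List.pyRange (n : Int) 0 (-1)) = (k : Int) ∧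
      pvGood tailN headN k ∧ k ≤ n ∧ ∀ j, pvGood tailN headN j → j ≤ n → j ≤ k := by
  induction n with
  | zero =>
    refine ⟨0, ?_, ⟨by omega, by simp⟩, le_refl 0, fun j _ hj => hj⟩
    norm_num
    rfl
  | succ m ih =>
    rw [pyRange_down_cons (m + 1) (by omega)]
    push_cast
    simp only [pvSearchA]
    by_cases hc : PySem.List.slice tailN (some (-((m : Int) + 1))) none
        = PySem.List.slice headN none (some ((m : Int) + 1))
    · refine ⟨m + 1, by rw [if_pos hc]; push_cast; ring, ?_, le_refl _, fun j _ hj => hj⟩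
      have := (pv_slice_cond_iff tailN headN (m + 1) (by omega) hn)
      push_cast at this
      exact ⟨hn, this.mp hc⟩
    · rw [if_neg hc]
      have hmm : ((m : Int) + 1 - 1) = (m : Int) := by ring
      rw [hmm]
      obtain ⟨k, hk1, hk2, hk3, hk4⟩ := ih (by omega)
      refine ⟨k, hk1, hk2, by omega, fun j hj hjn => ?_⟩
      rcases Nat.lt_or_ge j (m + 1) with h | h
      · exact hk4 j hj (by omega)
      · exfalso
        have hjm : j = m + 1 := by omega
        subst hjm
        have := (pv_slice_cond_iff tailN headN (m + 1) (by omega) hn)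
        push_cast at this
        exact hc (this.mpr hj.2)

-- ---- KMP prefix-function correctness (for B's _overlap) ----

-- k is a (proper) border of l
def pvBorder (l : List (List Char)) (k : Nat) : Prop :=
  k < l.length ∧ l.take k = l.drop (l.length - k)

theorem pv_border_zero (l : List (List Char)) (h : l ≠ []) : pvBorder l 0 :=
  ⟨List.length_pos_of_ne_nil h, by simp⟩

theorem pv_getD_take {α : Type} [Inhabited α] (s : List α) (i k : Nat) (h : k < i) (d : α) :
    (s.take i).getD k d = s.getD k d := by
  simp only [List.getD_eq_getElem?_getD, List.getElem?_take, if_pos h]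

theorem pv_getD_drop {α : Type} [Inhabited α] (s : List α) (i k : Nat) (d : α) :
    (s.drop i).getD k d = s.getD (i + k) d := by
  simp only [List.getD_eq_getElem?_getD, List.getElem?_drop]

theorem pv_getD_mem {α : Type} [Inhabited α] (l : List α) (j : Nat) (h : j < l.length) (d : α) :
    l.getD j d ∈ l := by
  rw [List.getD_eq_getElem?_getD, List.getElem?_eq_getElem h]
  exact List.getElem_mem h

theorem pv_border_snoc (l : List (List Char)) (c : List Char) (j : Nat) :
    pvBorder (l ++ [c]) (j + 1)
      ↔ j < l.length ∧ l.take j = l.drop (l.length - j) ∧ l.getD j [] = c := by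
  unfold pvBorder
  rw [List.length_append]
  simp only [List.length_cons, List.length_nil]
  constructor
  · rintro ⟨hlt, heq⟩
    have hj : j < l.length := by omega
    rw [List.take_append_of_le_length (by omega)] at heq
    have hidx : l.length + 1 - (j + 1) = l.length - j := by omega
    have hdrop : (l ++ [c]).drop (l.length + 1 - (j + 1)) = l.drop (l.length - j) ++ [c] := by
      rw [hidx, List.drop_append_of_le_length (by omega)]
    rw [hdrop] at heq
    have htake : l.take (j + 1) = l.take j ++ [l.getD j []] := by
      rw [List.take_add_one]
      congr 1
      rw [List.getElem?_eq_getElem hj]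
      simp [List.getD_eq_getElem?_getD, List.getElem?_eq_getElem hj]
    rw [htake, ← List.concat_eq_append, ← List.concat_eq_append, List.concat_inj] at heq
    exact ⟨hj, heq.1, heq.2⟩
  · rintro ⟨hj, heq, hc⟩
    refine ⟨by omega, ?_⟩
    rw [List.take_append_of_le_length (by omega)]
    have hidx : l.length + 1 - (j + 1) = l.length - j := by omega
    have hdrop : (l ++ [c]).drop (l.length + 1 - (j + 1)) = l.drop (l.length - j) ++ [c] := by
      rw [hidx, List.drop_append_of_le_length (by omega)]
    rw [hdrop]
    have htake : l.take (j + 1) = l.take j ++ [l.getD j []] := by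
      rw [List.take_add_one]
      congr 1
      rw [List.getElem?_eq_getElem hj]
      simp [List.getD_eq_getElem?_getD, List.getElem?_eq_getElem hj]
    rw [htake, heq, hc]

-- a border of a border (as prefix) is a border of the whole
theorem pv_border_trans (l : List (List Char)) (k j : Nat)
    (hk : pvBorder l k) (hj : pvBorder (l.take k) j) : pvBorder l j := by
  obtain ⟨hk1, hk2⟩ := hk
  obtain ⟨hj1, hj2⟩ := hj
  have hlk : (l.take k).length = k := by rw [List.length_take]; omega
  rw [hlk] at hj1 hj2
  refine ⟨by omega, ?_⟩
  calc l.take j = (l.take k).take j := by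
        rw [List.take_take, Nat.min_eq_left (by omega)]
    _ = (l.take k).drop (k - j) := hj2
    _ = (l.drop (l.length - k)).drop (k - j) := by rw [hk2]
    _ = l.drop (l.length - k + (k - j)) := List.drop_drop
    _ = l.drop (l.length - j) := by congr 1; omega

-- two nested borders: the smaller is a border of the larger one's prefix
theorem pv_border_of_borders (l : List (List Char)) (j k : Nat)
    (hj : pvBorder l j) (hk : pvBorder l k) (hjk : j < k) : pvBorder (l.take k) j := by
  obtain ⟨hj1, hj2⟩ := hj
  obtain ⟨hk1, hk2⟩ := hk
  have hlk : (l.take k).length = k := by rw [List.length_take]; omega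
  refine ⟨by omega, ?_⟩
  rw [hlk]
  calc (l.take k).take j = l.take j := by
        rw [List.take_take, Nat.min_eq_left (by omega)]
    _ = l.drop (l.length - j) := hj2
    _ = l.drop (l.length - k + (k - j)) := by congr 1; omega
    _ = (l.drop (l.length - k)).drop (k - j) := List.drop_drop.symm
    _ = (l.take k).drop (k - j) := by rw [hk2]

-- correctness of the fallback loop
theorem pv_fall_spec (s : List (List Char)) (i : Nat) (hi : i < s.length) (pi : List Nat)
    (Hpi : ∀ j, j < i → pvBorder (s.take (j + 1)) (pi.getD j 0) ∧
            ∀ b, pvBorder (s.take (j + 1)) b → b ≤ pi.getD j 0) :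
    ∀ k, k < i → (s.take i).take k = (s.take i).drop (i - k) →
    (∀ j, pvBorder (s.take i ++ [s.getD i []]) (j + 1) → j ≤ k) →
    pvFallB s pi (s.getD i []) k < i ∧
    (s.take i).take (pvFallB s pi (s.getD i []) k)
      = (s.take i).drop (i - pvFallB s pi (s.getD i []) k) ∧
    (∀ j, pvBorder (s.take i ++ [s.getD i []]) (j + 1) → j ≤ pvFallB s pi (s.getD i []) k) ∧
    (pvFallB s pi (s.getD i []) k ≠ 0 →
      s.getD (pvFallB s pi (s.getD i []) k) [] = s.getD i []) := by
  have hlen : (s.take i).length = i := by rw [List.length_take]; omega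
  intro k
  induction k using Nat.strong_induction_on with
  | _ k IH =>
    intro hki hcand hmax
    rw [pvFallB.eq_def]
    by_cases hk0 : k = 0
    · rw [if_pos hk0]
      subst hk0
      exact ⟨by omega, by simp [hcand], hmax, fun h => absurd rfl h⟩
    · rw [if_neg hk0]
      by_cases hkc : s.getD k [] = s.getD i []
      · rw [if_pos hkc]
        exact ⟨hki, hcand, hmax, fun _ => hkc⟩
      · rw [if_neg hkc]
        have hk1 : 1 ≤ k := by omega
        obtain ⟨hp, hpmax⟩ := Hpi (k - 1) (by omega)
        have hkk : k - 1 + 1 = k := by omega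
        rw [hkk] at hp hpmax
        have hplt : pi.getD (k - 1) 0 < k := by
          have := hp.1
          rw [List.length_take] at this
          omega
        have hmin : min (pi.getD (k - 1) 0) (k - 1) = pi.getD (k - 1) 0 :=
          Nat.min_eq_left (by omega)
        rw [hmin]
        set p := pi.getD (k - 1) 0 with hpdef
        -- k is a border of l := s.take i
        have hbk : pvBorder (s.take i) k := ⟨by rw [hlen]; omega, by rw [hlen]; exact hcand⟩
        -- s.take k = (s.take i).take k
        have htk : (s.take i).take k = s.take k := by
          rw [List.take_take, Nat.min_eq_left (by omega)]
        -- p is a border of l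
        have hbp : pvBorder (s.take i) p := by
          apply pv_border_trans (s.take i) k p hbk
          rw [htk]; exact hp
        -- maximality transfers to p
        have hmax' : ∀ j, pvBorder (s.take i ++ [s.getD i []]) (j + 1) → j ≤ p := by
          intro j hj
          have hjk : j ≤ k := hmax j hj
          have hjcomp := (pv_border_snoc (s.take i) (s.getD i []) j).mp hj
          have hjne : j ≠ k := by
            intro heq
            subst heq
            rw [pv_getD_take s i j (by omega)] at hjcomp
            exact hkc hjcomp.2.2
          have hbj : pvBorder (s.take i) j := ⟨hjcomp.1, hjcomp.2.1⟩
          have := pv_border_of_borders (s.take i) j k hbj hbk (by omega)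
          rw [htk] at this
          exact hpmax j this
        obtain ⟨hbp1, hbp2⟩ := hbp
        rw [hlen] at hbp1 hbp2
        exact IH p (by omega) hbp1 hbp2 hmax'

-- one KMP step computes the maximal border of the next prefix
theorem pv_step_max (s : List (List Char)) (i : Nat) (h1 : 1 ≤ i) (hi : i < s.length)
    (k : Nat) (pi : List Nat)
    (Hpi : ∀ j, j < i → pvBorder (s.take (j + 1)) (pi.getD j 0) ∧
            ∀ b, pvBorder (s.take (j + 1)) b → b ≤ pi.getD j 0)
    (Hk : pvBorder (s.take i) k ∧ ∀ b, pvBorder (s.take i) b → b ≤ k) :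
    pvBorder (s.take (i + 1)) (pvStepK s (k, pi) i).1 ∧
    (∀ b, pvBorder (s.take (i + 1)) b → b ≤ (pvStepK s (k, pi) i).1) ∧
    (pvStepK s (k, pi) i).2 = pi ++ [(pvStepK s (k, pi) i).1] := by
  have hlen : (s.take i).length = i := by rw [List.length_take]; omega
  have htake1 : s.take (i + 1) = s.take i ++ [s.getD i []] := by
    rw [List.take_add_one]
    congr 1
    rw [List.getElem?_eq_getElem hi]
    simp [List.getD_eq_getElem?_getD, List.getElem?_eq_getElem hi]
  obtain ⟨⟨hki0, hcand0⟩, hkmax⟩ := Hk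
  rw [hlen] at hki0 hcand0
  have hki : k < i := hki0
  have hcand : (s.take i).take k = (s.take i).drop (i - k) := hcand0
  have hmax0 : ∀ j, pvBorder (s.take i ++ [s.getD i []]) (j + 1) → j ≤ k := by
    intro j hj
    have hjcomp := (pv_border_snoc (s.take i) (s.getD i []) j).mp hj
    exact hkmax j ⟨hjcomp.1, hjcomp.2.1⟩
  obtain ⟨hr1, hr2, hr3, hr4⟩ := pv_fall_spec s i hi pi Hpi k hki hcand hmax0
  set r := pvFallB s pi (s.getD i []) k with hrdef
  have hr2' : (s.take i).take r = (s.take i).drop ((s.take i).length - r) := by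
    rw [hlen]; exact hr2
  have hne : s.take (i + 1) ≠ [] := by
    rw [htake1]; simp
  simp only [pvStepK]
  rw [← hrdef]
  by_cases hrc : s.getD r [] = s.getD i []
  · rw [if_pos hrc]
    refine ⟨?_, ?_, trivial⟩
    · rw [htake1]
      apply (pv_border_snoc (s.take i) (s.getD i []) r).mpr
      refine ⟨by rw [hlen]; omega, hr2', ?_⟩
      rw [pv_getD_take s i r (by omega)]
      exact hrc
    · intro b hb
      cases b with
      | zero => omega
      | succ j =>
        rw [htake1] at hb
        exact Nat.succ_le_succ (hr3 j hb)
  · rw [if_neg hrc]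
    have hr0 : r = 0 := by
      by_contra h
      exact hrc (hr4 h)
    rw [hr0] at hrc ⊢
    refine ⟨pv_border_zero _ hne, ?_, trivial⟩
    intro b hb
    cases b with
    | zero => omega
    | succ j =>
      exfalso
      rw [htake1] at hb
      have hj : j ≤ r := hr3 j hb
      have hj0 : j = 0 := by omega
      subst hj0
      have hjcomp := (pv_border_snoc (s.take i) (s.getD i []) 0).mp hb
      rw [pv_getD_take s i 0 (by omega)] at hjcomp
      exact hrc hjcomp.2.2

-- the KMP main loop: after processing indices 1..m, pi holds the maximal borders
theorem pv_kmp_loop (s : List (List Char)) (m : Nat) (hm : m < s.length) :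
    ∃ pi : List Nat, (List.range' 1 m).foldl (pvStepK s) (0, [0]) = (pi.getD m 0, pi) ∧
      pi.length = m + 1 ∧
      ∀ j, j < m + 1 → pvBorder (s.take (j + 1)) (pi.getD j 0) ∧
        ∀ b, pvBorder (s.take (j + 1)) b → b ≤ pi.getD j 0 := by
  induction m with
  | zero =>
    refine ⟨[0], rfl, rfl, ?_⟩
    intro j hj
    have hj0 : j = 0 := by omega
    subst hj0
    have hne : s.take 1 ≠ [] := by
      have : (s.take 1).length = 1 := by rw [List.length_take]; omega
      intro h; rw [h] at this; simp at this
    refine ⟨pv_border_zero _ hne, fun b hb => ?_⟩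
    have := hb.1
    rw [List.length_take] at this
    omega
  | succ m ih =>
    obtain ⟨pi, hfold, hlen, hinv⟩ := ih (by omega)
    have hrange : List.range' 1 (m + 1) = List.range' 1 m ++ [m + 1] := by
      rw [List.range'_concat]
      congr 1
      simp [Nat.add_comm]
    rw [hrange, List.foldl_append, hfold]
    simp only [List.foldl_cons, List.foldl_nil]
    have hstep := pv_step_max s (m + 1) (by omega) hm (pi.getD m 0) pi
      (fun j hj => hinv j (by omega)) (hinv m (by omega))
    set k2 := (pvStepK s (pi.getD m 0, pi) (m + 1)).1 with hk2
    refine ⟨pi ++ [k2], ?_, by simp [hlen], ?_⟩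
    · have h2 := hstep.2.2
      have hgd : (pi ++ [k2]).getD (m + 1) 0 = k2 := by
        rw [List.getD_eq_getElem?_getD, List.getElem?_append_right (by omega)]
        simp [hlen]
      rw [hgd, ← h2]
    · intro j hj
      rcases Nat.lt_or_ge j (m + 1) with h | h
      · have hgd : (pi ++ [k2]).getD j 0 = pi.getD j 0 := by
          rw [List.getD_eq_getElem?_getD, List.getElem?_append_left (by omega),
            ← List.getD_eq_getElem?_getD]
        rw [hgd]
        exact hinv j h
      · have hjm : j = m + 1 := by omega
        subst hjm
        have hgd : (pi ++ [k2]).getD (m + 1) 0 = k2 := by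
          rw [List.getD_eq_getElem?_getD, List.getElem?_append_right (by omega)]
          simp [hlen]
        rw [hgd]
        exact ⟨hstep.1, hstep.2.1⟩

-- B's _overlap returns the maximal border of head ++ [" "] ++ tail
theorem pv_overlapB_max (tailN headN : List (List Char)) :
    pvBorder (headN ++ [[' ']] ++ tailN) (pvOverlapB tailN headN) ∧
    ∀ b, pvBorder (headN ++ [[' ']] ++ tailN) b → b ≤ pvOverlapB tailN headN := by
  set s := headN ++ [[' ']] ++ tailN with hs
  have hslen : s.length = headN.length + 1 + tailN.length := by
    simp [hs, List.length_append]
    omega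
  have hpos : 0 < s.length := by omega
  obtain ⟨pi, hfold, hlen, hinv⟩ := pv_kmp_loop s (s.length - 1) (by omega)
  have : pvOverlapB tailN headN = pi.getD (s.length - 1) 0 := by
    simp only [pvOverlapB, ← hs, hfold]
  rw [this]
  have := hinv (s.length - 1) (by omega)
  have htk : s.take (s.length - 1 + 1) = s := by
    rw [Nat.sub_add_cancel (by omega)]
    exact List.take_length
  rwa [htk] at this

-- the sentinel token [' '] is not a token: tokens contain no whitespace
theorem pv_sep_notin (ws : List (List Char))
    (h : ∀ w ∈ ws, ∀ ch ∈ w, PySem.Chars.isspace ch = false) : [' '] ∉ ws := by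
  intro hmem
  have := h _ hmem ' ' (by simp)
  have hsp : PySem.Chars.isspace ' ' = true := by decide
  rw [hsp] at this
  exact absurd this (by simp)

-- the only sentinel position in head ++ [" "] ++ tail is head.length
theorem pv_sep_pos (t h : List (List Char)) (ht : [' '] ∉ t) (hh : [' '] ∉ h) (j : Nat)
    (hj : j < (h ++ [[' ']] ++ t).length)
    (heq : (h ++ [[' ']] ++ t).getD j [] = [' ']) : j = h.length := by
  have hslen : (h ++ [[' ']] ++ t).length = h.length + 1 + t.length := by
    simp [List.length_append]; omega
  rw [List.append_assoc] at heq
  rcases Nat.lt_trichotomy j h.length with hlt | heqj | hgt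
  · exfalso
    rw [List.getD_eq_getElem?_getD, List.getElem?_append_left hlt,
      ← List.getD_eq_getElem?_getD] at heq
    have := pv_getD_mem h j hlt []
    rw [heq] at this
    exact hh this
  · exact heqj
  · exfalso
    rw [List.getD_append_right h _ [] j (by omega), List.singleton_append] at heq
    have hj1 : j - h.length = (j - h.length - 1) + 1 := by omega
    rw [hj1, List.getD_cons_succ] at heq
    have hlt2 : j - h.length - 1 < t.length := by omega
    have := pv_getD_mem t (j - h.length - 1) hlt2 []
    rw [heq] at this
    exact ht this

-- borders of head ++ [" "] ++ tail are exactly the valid seam overlaps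
theorem pv_border_sentinel (t h : List (List Char)) (ht : [' '] ∉ t) (hh : [' '] ∉ h)
    (b : Nat) :
    pvBorder (h ++ [[' ']] ++ t) b ↔ pvGood t h b := by
  set s := h ++ [[' ']] ++ t with hs
  have hslen : s.length = h.length + 1 + t.length := by
    simp [hs, List.length_append]; omega
  have hsl2 : (h ++ [[' ']] ++ t).length = s.length := by rw [← hs]
  have hsep : s.getD h.length [] = [' '] := by
    rw [hs, List.append_assoc, List.getD_append_right h _ [] h.length (le_refl _),
      List.singleton_append]
    simp
  have hstep : s.drop (h.length + 1) = t := by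
    have hl : (h ++ [[' ']]).length = h.length + 1 := by simp
    rw [hs, ← hl, List.drop_left]
  have htk : ∀ b' : Nat, b' ≤ h.length → s.take b' = h.take b' := by
    intro b' hb'
    rw [hs, List.append_assoc]
    exact List.take_append_of_le_length hb'
  have hdr : ∀ b' : Nat, b' ≤ t.length → s.drop (s.length - b') = t.drop (t.length - b') := by
    intro b' hb'
    have hidx : s.length - b' = (h.length + 1) + (t.length - b') := by omega
    rw [hidx, ← List.drop_drop, hstep]
  constructor
  · rintro ⟨hb, heq⟩
    have hbh : b ≤ h.length := by
      by_contra hc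
      have key := congrArg (fun l => l.getD h.length ([] : List Char)) heq
      simp only at key
      rw [pv_getD_take s b h.length (by omega), pv_getD_drop, hsep] at key
      have := pv_sep_pos t h ht hh (s.length - b + h.length) (by omega) key.symm
      omega
    have hbt : b ≤ t.length := by
      by_contra hc
      have hb1 : 1 ≤ b := by omega
      have key := congrArg (fun l => l.getD (b - t.length - 1) ([] : List Char)) heq
      simp only at key
      rw [pv_getD_take s b (b - t.length - 1) (by omega), pv_getD_drop] at key
      have hidx : s.length - b + (b - t.length - 1) = h.length := by omega
      rw [hidx, hsep] at key
      have hmem : s.getD (b - t.length - 1) [] ∈ h := by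
        rw [hs, List.append_assoc, List.getD_eq_getElem?_getD,
          List.getElem?_append_left (by omega), ← List.getD_eq_getElem?_getD]
        exact pv_getD_mem h (b - t.length - 1) (by omega) []
      rw [key] at hmem
      exact hh hmem
    refine ⟨by omega, ?_⟩
    rw [htk b hbh, hdr b hbt] at heq
    exact heq.symm
  · rintro ⟨hmin, heq⟩
    have hbt : b ≤ t.length := le_trans hmin (Nat.min_le_left _ _)
    have hbh : b ≤ h.length := le_trans hmin (Nat.min_le_right _ _)
    refine ⟨by omega, ?_⟩
    rw [htk b hbh, hdr b hbt]
    exact heq.symm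

-- B's KMP overlap equals A's descending seam search
theorem pv_overlap_eq (tailN headN : List (List Char))
    (ht : ∀ w ∈ tailN, ∀ ch ∈ w, PySem.Chars.isspace ch = false)
    (hh : ∀ w ∈ headN, ∀ ch ∈ w, PySem.Chars.isspace ch = false) :
    ((pvOverlapB tailN headN : Nat) : Int)
      = pvSearchA tailN headN
          (PySem.List.pyRange (min (tailN.length : Int) (headN.length : Int)) 0 (-1)) := by
  have hsep_t := pv_sep_notin tailN ht
  have hsep_h := pv_sep_notin headN hh
  have hcast : min (tailN.length : Int) (headN.length : Int)
      = ((min tailN.length headN.length : Nat) : Int) := by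
    rw [Nat.cast_min]
  rw [hcast]
  obtain ⟨k, hk1, hk2, _, hk4⟩ :=
    pv_searchA_spec tailN headN (min tailN.length headN.length) (le_refl _)
  rw [hk1]
  obtain ⟨hK1, hK2⟩ := pv_overlapB_max tailN headN
  have hKgood : pvGood tailN headN (pvOverlapB tailN headN) :=
    (pv_border_sentinel tailN headN hsep_t hsep_h _).mp hK1
  have hle1 : pvOverlapB tailN headN ≤ k := hk4 _ hKgood hKgood.1
  have hle2 : k ≤ pvOverlapB tailN headN :=
    hK2 k ((pv_border_sentinel tailN headN hsep_t hsep_h k).mpr hk2)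
  have : pvOverlapB tailN headN = k := by omega
  rw [this]

-- normalization never introduces whitespace
theorem pv_norm_nospace (u : List Char) (hu : ∀ ch ∈ u, PySem.Chars.isspace ch = false) :
    ∀ ch ∈ pvNormA u, PySem.Chars.isspace ch = false := by
  intro ch hch
  unfold pvNormA PySem.Chars.lower at hch
  obtain ⟨c', hc'mem, rfl⟩ := List.mem_map.mp hch
  have hc'u : c' ∈ u := by
    unfold PySem.Chars.stripChars at hc'mem
    rw [List.mem_reverse] at hc'mem
    have h1 := (List.dropWhile_sublist _ (l := (List.dropWhile _ u).reverse)).mem hc'mem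
    rw [List.mem_reverse] at h1
    exact (List.dropWhile_sublist _ (l := u)).mem h1
  have hc' := hu c' hc'u
  unfold PySem.Chars.lowerChar
  split
  · rename_i hup
    simp only [PySem.Chars.isupper, Bool.and_eq_true, decide_eq_true_eq] at hup
    have h65 : 65 ≤ c'.toNat := by
      have := hup.1
      simpa [Char.le_def] using this
    have h90 : c'.toNat ≤ 90 := by
      have := hup.2
      simpa [Char.le_def] using this
    have hvalid : (c'.toNat + 32).isValidChar := by
      left; omega
    have htn : (Char.ofNat (c'.toNat + 32)).toNat = c'.toNat + 32 := by
      rw [Char.toNat_ofNat, if_pos hvalid]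
    simp only [PySem.Chars.isspace, htn]
    simp
    omega
  · exact hc'

-- one step of B preserves the invariant and tracks A's merge
theorem pv_split_nil : PySem.Chars.split₀ [] = [] := rfl

theorem pv_step_eq (result nxt : List Char) (m : Int) :
    pvStepB (result, (PySem.Chars.split₀ result).map pvNormB) nxt m
      = (pvMergeA result nxt m, (PySem.Chars.split₀ (pvMergeA result nxt m)).map pvNormB) := by
  have hnormf : pvNormB = pvNormA := rfl
  simp only [pvStepB, pvMergeA, hnormf]
  rw [pv_slice_map]
  set W := PySem.Chars.split₀ result with hW
  set H := PySem.Chars.split₀ nxt with hH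
  set tailN := (PySem.List.slice W (some (-m)) none).map pvNormA with htail
  set headN := (PySem.List.slice H none (some m)).map pvNormA with hhead
  have htok_t : ∀ w ∈ tailN, ∀ ch ∈ w, PySem.Chars.isspace ch = false := by
    intro w hw
    obtain ⟨u, hu, rfl⟩ := List.mem_map.mp hw
    exact pv_norm_nospace u (pv_split_words result u (pv_mem_slice hu)).2
  have htok_h : ∀ w ∈ headN, ∀ ch ∈ w, PySem.Chars.isspace ch = false := by
    intro w hw
    obtain ⟨u, hu, rfl⟩ := List.mem_map.mp hw
    exact pv_norm_nospace u (pv_split_words nxt u (pv_mem_slice hu)).2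
  have hbest := pv_overlap_eq tailN headN htok_t htok_h
  set KB := pvOverlapB tailN headN with hKB
  set KA := pvSearchA tailN headN
    (PySem.List.pyRange (min (tailN.length : Int) (headN.length : Int)) 0 (-1)) with hKA
  by_cases h3 : 3 ≤ KB
  · have h3A : (3 : Int) ≤ KA := by rw [← hbest]; exact_mod_cast h3
    rw [if_pos h3, if_pos h3A, ← hbest]
    set rem := PySem.List.slice H (some (KB : Int)) none with hrem
    have hremw : ∀ w ∈ rem, w ≠ [] ∧ ∀ ch ∈ w, PySem.Chars.isspace ch = false :=
      fun w hw => pv_split_words nxt w (pv_mem_slice hw)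
    by_cases hre : rem = []
    · rw [if_neg (by simp [hre]), if_neg (by simp [hre])]
      exact Prod.ext rfl (by simp only [hre, List.map_nil, List.append_nil]; rw [hW])
    · rw [if_pos hre, if_pos (pv_join_ne_nil rem hre (fun w hw => (hremw w hw).1))]
      refine Prod.ext rfl ?_
      rw [pv_split_strip, pv_split_append_space ' ' (by decide),
          pv_split_join rem hremw, List.map_append]
  · have h3A : ¬ (3 : Int) ≤ KA := by
      rw [← hbest]
      intro hc
      exact h3 (by exact_mod_cast hc)
    rw [if_neg h3, if_neg h3A]
    by_cases hres : result = []
    · rw [if_pos hres, if_pos hres]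
      refine Prod.ext rfl ?_
      rw [hW, hres, pv_split_nil]
      simp
      rw [hH]
    · rw [if_neg hres, if_neg hres]
      by_cases hnx : nxt = []
      · rw [if_pos hnx, if_pos hnx]
      · rw [if_neg hnx, if_neg hnx]
        refine Prod.ext rfl ?_
        rw [pv_split_append_space ' ' (by decide), List.map_append]

theorem pv_fold_eq (rest : List String) (res : List Char) (m : Int) :
    rest.foldl (fun st nx => pvStepB st nx.toList m)
      (res, (PySem.Chars.split₀ res).map pvNormB)
      = (rest.foldl (fun acc nx => pvMergeA acc nx.toList m) res,
         (PySem.Chars.split₀ (rest.foldl (fun acc nx => pvMergeA acc nx.toList m) res)).map pvNormB) := by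
  induction rest generalizing res with
  | nil => rfl
  | cons x xs ih => simp only [List.foldl_cons, pv_step_eq, ih]

-- ===== VERDICT (by name: the statement is the Claim_ definition above) =====
theorem stitch_transcripts_spec : Claim_equal_stitch_transcripts := by
  intro chunks m _
  unfold Spec_stitch_transcripts stitch_transcripts stitch_transcripts_alt
  match chunks with
  | [] => rfl
  | [c] => simp
  | c :: c2 :: rest => simp only [List.foldl_cons, pv_step_eq, pv_fold_eq]
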